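-- pv_equiv track=rewrite | github.com/GitThemAll/MoodiesData | domains/insights/filters/get_top_skus_metrics.py | order_count_per_sku
-- ===== SOURCE A (Python) =====
-- from collections import defaultdict
--
-- def order_count_per_sku(orders: list[dict]) -> dict[str, int]:
--     sku_counts = defaultdict(int)
--
--     for order in orders:
--         seen_skus = set() #set type indicated to avoind duplicating sku count
--         for item in order.get("line_items", []):
--             sku = item.get("sku")
--             if sku and sku not in seen_skus:
--                 sku_counts[sku] += 1
--                 seen_skus.add(sku)
--
--     return dict(sku_counts)
-- ===== SOURCE B (Python) =====
-- from collections import defaultdict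
--
-- def order_count_per_sku(orders: list[dict]) -> dict[str, int]:
--     # Inverted index: sku -> set of order indices, then take set sizes.
--     sku_orders = defaultdict(set)
--     for idx, order in enumerate(orders):
--         for item in order.get("line_items", []):
--             sku = item.get("sku")
--             if sku:
--                 sku_orders[sku].add(idx)
--     return {sku: len(order_ids) for sku, order_ids in sku_orders.items()}
-- ===== Notes on version B (the rewrite author's own statement) =====
-- stated objective: alternative
-- what changed: Replaces the per-order seen-set with inline counter increments by an inverted index: one pass builds a defaultdict mapping each SKU to the set of order indices containing it, and the result is the per-SKU set sizes; deduplication happens across the whole traversal instead of within each order.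
import Mathlib
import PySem

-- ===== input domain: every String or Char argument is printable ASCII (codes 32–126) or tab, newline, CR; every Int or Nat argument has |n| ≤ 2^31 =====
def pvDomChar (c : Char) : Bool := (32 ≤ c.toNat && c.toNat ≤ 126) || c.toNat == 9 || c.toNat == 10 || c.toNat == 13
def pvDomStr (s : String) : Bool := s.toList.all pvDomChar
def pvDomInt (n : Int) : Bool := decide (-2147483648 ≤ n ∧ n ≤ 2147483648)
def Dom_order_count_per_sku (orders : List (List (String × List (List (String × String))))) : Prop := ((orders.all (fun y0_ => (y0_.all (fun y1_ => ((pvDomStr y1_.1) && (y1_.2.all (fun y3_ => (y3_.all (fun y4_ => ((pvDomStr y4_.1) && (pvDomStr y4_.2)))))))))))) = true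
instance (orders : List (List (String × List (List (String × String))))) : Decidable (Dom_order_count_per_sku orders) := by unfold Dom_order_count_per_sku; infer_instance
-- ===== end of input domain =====

-- B replaces A's per-order seen-set + inline counter increments by an inverted index
-- (SKU -> set of order indices, then set sizes); same cost, different aggregation structure.

-- ===== PORT A =====
-- order.get("line_items", [])
def pvLineItems (order : List (String × List (List (String × String)))) : List (List (String × String)) :=
  (PySem.Dict.mk order).getD "line_items" []

-- item.get("sku")
def pvSku (item : List (String × String)) : Option String :=
  (PySem.Dict.mk item).get? "sku"

-- body of A's inner loop: state is (sku_counts, seen_skus)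
def pvAInner (st : PySem.Dict String Int × PySem.Set String) (item : List (String × String)) :
    PySem.Dict String Int × PySem.Set String :=
  match pvSku item with
  | some sku =>
      if sku ≠ "" ∧ PySem.Set.contains st.2 sku = false then
        (st.1.modify sku 0 (· + 1), st.2.add sku)
      else st
  | none => st

-- body of A's outer loop: fresh seen_skus per order, keep only sku_counts
def pvAOrder (counts : PySem.Dict String Int)
    (order : List (String × List (List (String × String)))) : PySem.Dict String Int :=
  ((pvLineItems order).foldl pvAInner (counts, PySem.Set.empty)).1

def order_count_per_sku (orders : List (List (String × List (List (String × String))))) : List (String × Int) :=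
  (orders.foldl pvAOrder PySem.Dict.empty).items

-- ===== PORT B =====
-- body of B's inner loop at order index idx: sku_orders[sku].add(idx)
def pvBInner (idx : Int) (d : PySem.Dict String (PySem.Set Int)) (item : List (String × String)) :
    PySem.Dict String (PySem.Set Int) :=
  match pvSku item with
  | some sku =>
      if sku ≠ "" then d.modify sku PySem.Set.empty (fun s => s.add idx) else d
  | none => d

def order_count_per_sku_alt (orders : List (List (String × List (List (String × String))))) : List (String × Int) :=
  (((PySem.List.enumerate orders 0).foldl
      (fun d p => (pvLineItems p.2).foldl (pvBInner p.1) d)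
      (PySem.Dict.empty : PySem.Dict String (PySem.Set Int))).items).map
    (fun p => (p.1, PySem.Set.len p.2))

-- ===== PRECONDITION & SPEC =====
def Spec_order_count_per_sku (orders : List (List (String × List (List (String × String))))) (out : List (String × Int)) : Prop := out = order_count_per_sku_alt orders
instance (orders : List (List (String × List (List (String × String))))) (out : List (String × Int)) : Decidable (Spec_order_count_per_sku orders out) := by unfold Spec_order_count_per_sku; infer_instance

-- ===== CLAIM (what is proved, stated in full; the proofs are below) =====
def Claim_equal_order_count_per_sku : Prop := ∀ (orders : List (List (String × List (List (String × String))))), Dom_order_count_per_sku orders → Spec_order_count_per_sku orders (order_count_per_sku orders)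

-- ===== LEMMAS AND PROOFS =====

-- joint invariant between A's counter and B's inverted index after processing the
-- first orders (all of index < n)
def pvInv (c : PySem.Dict String Int) (d : PySem.Dict String (PySem.Set Int)) (n : Int) : Prop :=
  c.keys = d.keys ∧ d.keys.Nodup ∧
  (∀ s, c.getD s 0 = PySem.Set.len (d.getD s PySem.Set.empty)) ∧
  (∀ s i, i ∈ d.getD s PySem.Set.empty → i < n)

-- joint invariant inside order number n (A's seen-set s holds exactly the SKUs whose
-- index-set already contains n)
def pvInvIn (c : PySem.Dict String Int) (seen : PySem.Set String)
    (d : PySem.Dict String (PySem.Set Int)) (n : Int) : Prop :=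
  c.keys = d.keys ∧ d.keys.Nodup ∧
  (∀ s, c.getD s 0 = PySem.Set.len (d.getD s PySem.Set.empty)) ∧
  (∀ s i, i ∈ d.getD s PySem.Set.empty → i ≤ n) ∧
  (∀ s, PySem.Set.contains seen s = true ↔ n ∈ d.getD s PySem.Set.empty)

theorem pvSet_add_eq_of_mem {x : Int} {s : PySem.Set Int} (h : x ∈ s) : s.add x = s := by
  simp [PySem.Set.add, PySem.Set.contains, h]

theorem pvSet_len_add_not_mem {x : Int} {s : PySem.Set Int} (h : x ∉ s) :
    PySem.Set.len (s.add x) = PySem.Set.len s + 1 := by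
  simp [PySem.Set.len, PySem.Set.add, PySem.Set.contains, h]

theorem pvInner_step (c : PySem.Dict String Int) (seen : PySem.Set String)
    (d : PySem.Dict String (PySem.Set Int)) (n : Int) (item : List (String × String))
    (h : pvInvIn c seen d n) :
    pvInvIn (pvAInner (c, seen) item).1 (pvAInner (c, seen) item).2 (pvBInner n d item) n := by
  obtain ⟨hk, hnd, hlen, hbd, hseen⟩ := h
  unfold pvAInner pvBInner
  cases hsku : pvSku item with
  | none => exact ⟨hk, hnd, hlen, hbd, hseen⟩
  | some sku =>
    dsimp only
    by_cases hne : sku = ""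
    · rw [if_neg (fun h => h.1 hne), if_neg (by simp [hne])]
      exact ⟨hk, hnd, hlen, hbd, hseen⟩
    · by_cases hsn : PySem.Set.contains seen sku = true
      · -- A skips; B's modify is a no-op on every lookup
        have hmem : n ∈ d.getD sku PySem.Set.empty := (hseen sku).mp hsn
        rw [if_neg (by rintro ⟨-, h2⟩; simp at hsn h2; exact h2 hsn), if_pos hne]
        have hval : ∀ s', (d.modify sku PySem.Set.empty (fun s => s.add n)).getD s' PySem.Set.empty
            = d.getD s' PySem.Set.empty := by
          intro s'
          rw [PySem.Dict.getD_modify]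
          split_ifs with hs
          · subst hs; exact pvSet_add_eq_of_mem hmem
          · rfl
        have hcont : d.contains sku = true := by
          by_contra hc
          have : d.getD sku PySem.Set.empty = PySem.Set.empty :=
            PySem.Dict.getD_of_not_contains _ _ (by simpa using hc)
          rw [this] at hmem
          simp [PySem.Set.empty] at hmem
        have hkeys : (d.modify sku PySem.Set.empty (fun s => s.add n)).keys = d.keys := by
          rw [PySem.Dict.keys_modify, PySem.Dict.keys_insert_of_contains _ _ hcont]
        refine ⟨by rw [hkeys]; exact hk, by rw [hkeys]; exact hnd, ?_, ?_, ?_⟩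
        · intro s; rw [hval]; exact hlen s
        · intro s i hi; rw [hval] at hi; exact hbd s i hi
        · intro s; rw [hval]; exact hseen s
      · -- both record sku
        have hnmem : n ∉ d.getD sku PySem.Set.empty := fun hm => hsn ((hseen sku).mpr hm)
        have hsn' : PySem.Set.contains seen sku = false := by simpa using hsn
        rw [if_pos ⟨hne, hsn'⟩, if_pos hne]
        have hcontEq : c.contains sku = d.contains sku := by
          rw [PySem.Dict.contains_eq_decide_mem_keys, PySem.Dict.contains_eq_decide_mem_keys, hk]
        have hvalD : ∀ s', (d.modify sku PySem.Set.empty (fun s => s.add n)).getD s' PySem.Set.empty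
            = if s' = sku then (d.getD sku PySem.Set.empty).add n else d.getD s' PySem.Set.empty := by
          intro s'; rw [PySem.Dict.getD_modify]
        have hvalC : ∀ s', (c.modify sku 0 (· + 1)).getD s' 0
            = if s' = sku then c.getD sku 0 + 1 else c.getD s' 0 := by
          intro s'; rw [PySem.Dict.getD_modify]
        have hkeysEq : (c.modify sku 0 (· + 1)).keys
            = (d.modify sku PySem.Set.empty (fun s => s.add n)).keys := by
          rw [PySem.Dict.keys_modify, PySem.Dict.keys_modify]
          by_cases hc : d.contains sku = true
          · rw [PySem.Dict.keys_insert_of_contains _ _ hc,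
              PySem.Dict.keys_insert_of_contains _ _ (hcontEq ▸ hc), hk]
          · have hc' : d.contains sku = false := by simpa using hc
            rw [PySem.Dict.keys_insert_of_not_contains _ _ hc',
              PySem.Dict.keys_insert_of_not_contains _ _ (by rw [hcontEq]; exact hc'), hk]
        have hndD : (d.modify sku PySem.Set.empty (fun s => s.add n)).keys.Nodup := by
          rw [PySem.Dict.keys_modify]
          exact PySem.Dict.nodup_keys_insert _ _ _ hnd
        refine ⟨hkeysEq, hndD, ?_, ?_, ?_⟩
        · intro s; rw [hvalC, hvalD]
          split_ifs with hs
          · rw [hlen sku, pvSet_len_add_not_mem hnmem]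
          · exact hlen s
        · intro s i hi; rw [hvalD] at hi
          split_ifs at hi with hs
          · rcases (PySem.Set.mem_add _ _ _).mp hi with h' | h'
            · exact hbd sku i h'
            · omega
          · exact hbd s i hi
        · intro s; rw [hvalD]
          constructor
          · intro hcs
            rcases (PySem.Set.contains_iff _ _).mp hcs |> (PySem.Set.mem_add _ _ _).mp with h' | h'
            · have := (hseen s).mp ((PySem.Set.contains_iff _ _).mpr h')
              split_ifs with hs
              · subst hs; exact (PySem.Set.mem_add _ _ _).mpr (Or.inl this)
              · exact this
            · subst h'
              rw [if_pos rfl]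
              exact (PySem.Set.mem_add _ _ _).mpr (Or.inr rfl)
          · intro hm
            split_ifs at hm with hs
            · subst hs
              exact (PySem.Set.contains_iff _ _).mpr ((PySem.Set.mem_add _ _ _).mpr (Or.inr rfl))
            · exact (PySem.Set.contains_iff _ _).mpr
                ((PySem.Set.mem_add _ _ _).mpr (Or.inl ((PySem.Set.contains_iff _ _).mp ((hseen s).mpr hm))))

theorem pvInner_fold (items : List (List (String × String))) :
    ∀ (c : PySem.Dict String Int) (seen : PySem.Set String)
      (d : PySem.Dict String (PySem.Set Int)) (n : Int),
      pvInvIn c seen d n →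
      pvInvIn (items.foldl pvAInner (c, seen)).1 (items.foldl pvAInner (c, seen)).2
        (items.foldl (pvBInner n) d) n := by
  induction items with
  | nil => intro c seen d n h; exact h
  | cons item rest ih =>
    intro c seen d n h
    have := pvInner_step c seen d n item h
    simpa using ih (pvAInner (c, seen) item).1 (pvAInner (c, seen) item).2
      (pvBInner n d item) n this

theorem pvOrder_step (c : PySem.Dict String Int) (d : PySem.Dict String (PySem.Set Int))
    (n : Int) (order : List (String × List (List (String × String))))
    (h : pvInv c d n) :
    pvInv (pvAOrder c order) ((pvLineItems order).foldl (pvBInner n) d) (n + 1) := by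
  obtain ⟨hk, hnd, hlen, hbd⟩ := h
  have h0 : pvInvIn c PySem.Set.empty d n := by
    refine ⟨hk, hnd, hlen, fun s i hi => le_of_lt (hbd s i hi), fun s => ?_⟩
    constructor
    · intro hc; simp [PySem.Set.contains, PySem.Set.empty] at hc
    · intro hm; exact absurd (hbd s n hm) (lt_irrefl n)
  have := pvInner_fold (pvLineItems order) c PySem.Set.empty d n h0
  obtain ⟨hk', hnd', hlen', hbd', _⟩ := this
  exact ⟨hk', hnd', hlen', fun s i hi => lt_of_le_of_lt (hbd' s i hi) (by omega)⟩

theorem pvOuter_fold (orders : List (List (String × List (List (String × String))))) :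
    ∀ (c : PySem.Dict String Int) (d : PySem.Dict String (PySem.Set Int)) (n : Int),
      pvInv c d n →
      pvInv (orders.foldl pvAOrder c)
        ((PySem.List.enumerate orders n).foldl
          (fun d p => (pvLineItems p.2).foldl (pvBInner p.1) d) d)
        (n + orders.length) := by
  induction orders with
  | nil => intro c d n h; simpa [PySem.List.enumerate] using h
  | cons o rest ih =>
    intro c d n h
    rw [PySem.List.enumerate_cons]
    simp only [List.foldl_cons, List.length_cons]
    have h1 := pvOrder_step c d n o h
    have h2 := ih (pvAOrder c o) ((pvLineItems o).foldl (pvBInner n) d) (n + 1) h1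
    have : n + 1 + (rest.length : Int) = n + (rest.length + 1 : Nat) := by push_cast; ring
    rw [this] at h2
    exact h2

-- ===== VERDICT (by name: the statement is the Claim_ definition above) =====
theorem order_count_per_sku_spec : Claim_equal_order_count_per_sku := by
  intro orders _
  unfold Spec_order_count_per_sku order_count_per_sku order_count_per_sku_alt
  have h0 : pvInv PySem.Dict.empty PySem.Dict.empty 0 := by
    refine ⟨by simp [PySem.Dict.keys_empty], by simp [PySem.Dict.keys_empty], ?_, ?_⟩
    · intro s; simp [PySem.Dict.getD_empty, PySem.Set.len, PySem.Set.empty]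
    · intro s i hi; simp [PySem.Dict.getD_empty, PySem.Set.empty] at hi
  obtain ⟨hk, hnd, hlen, _⟩ := pvOuter_fold orders PySem.Dict.empty PySem.Dict.empty 0 h0
  set C := orders.foldl pvAOrder PySem.Dict.empty with hC
  set D := (PySem.List.enumerate orders 0).foldl
      (fun d p => (pvLineItems p.2).foldl (pvBInner p.1) d) PySem.Dict.empty with hD
  rw [PySem.Dict.items_eq_map_keys C (hk ▸ hnd) 0,
    PySem.Dict.items_eq_map_keys D hnd PySem.Set.empty, hk, List.map_map]
  exact List.map_congr_left (fun k _ => by simp [Function.comp, hlen k])
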